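-- pv_equiv track=rewrite | github.com/zvyc/pyChess | chess.py | find_straight_positions_between
-- ===== SOURCE A (Python) =====
-- def find_straight_positions_between(piece1, piece2):
--   path_positions = []
--   # Path goes from NE to SW
--   if piece1[1] - piece2[1] == 0:
--     if piece1[0]+1 < piece2[0]:
--       for row_index in range(piece1[0]+1, piece2[0]):
--         path_positions.append((row_index, piece1[1]))
--     else:
--       for row_index in range(piece2[0]+1, piece1[0]):
--         path_positions.append((row_index, piece1[1]))
--   elif piece1[0] - piece2[0] == 0:
--     if piece1[1]+1 < piece2[1]:
--       for column_index in range(piece1[1]+1, piece2[1]):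
--         path_positions.append((piece1[0], column_index))
--     else:
--       for column_index in range(piece2[1]+1, piece1[1]):
--         path_positions.append((piece1[0], column_index))
--
--   return path_positions
-- ===== SOURCE B (Python) =====
-- def find_straight_positions_between(piece1, piece2):
--     r1, c1 = piece1
--     r2, c2 = piece2
--     # not straight-aligned, or identical squares: nothing in between
--     if (r1 != r2 and c1 != c2) or (r1 == r2 and c1 == c2):
--         return []
--     # walk from the smaller endpoint towards the larger one (A's order)
--     if r1 < r2 or (r1 == r2 and c1 < c2):
--         lo, hi = piece1, piece2
--     else:
--         lo, hi = piece2, piece1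
--     dr = (hi[0] > lo[0]) - (hi[0] < lo[0])
--     dc = (hi[1] > lo[1]) - (hi[1] < lo[1])
--     out = []
--     cur = (lo[0] + dr, lo[1] + dc)
--     while cur != hi:
--         out.append(cur)
--         cur = (cur[0] + dr, cur[1] + dc)
--     return out
-- ===== Notes on version B (the rewrite author's own statement) =====
-- stated objective: alternative
-- what changed: Replaces the four orientation-specific range() branches with a single directional cursor walk: pick the lexicographically smaller endpoint, compute a unit step vector, and append squares while the cursor has not reached the other endpoint.
import Mathlib
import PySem

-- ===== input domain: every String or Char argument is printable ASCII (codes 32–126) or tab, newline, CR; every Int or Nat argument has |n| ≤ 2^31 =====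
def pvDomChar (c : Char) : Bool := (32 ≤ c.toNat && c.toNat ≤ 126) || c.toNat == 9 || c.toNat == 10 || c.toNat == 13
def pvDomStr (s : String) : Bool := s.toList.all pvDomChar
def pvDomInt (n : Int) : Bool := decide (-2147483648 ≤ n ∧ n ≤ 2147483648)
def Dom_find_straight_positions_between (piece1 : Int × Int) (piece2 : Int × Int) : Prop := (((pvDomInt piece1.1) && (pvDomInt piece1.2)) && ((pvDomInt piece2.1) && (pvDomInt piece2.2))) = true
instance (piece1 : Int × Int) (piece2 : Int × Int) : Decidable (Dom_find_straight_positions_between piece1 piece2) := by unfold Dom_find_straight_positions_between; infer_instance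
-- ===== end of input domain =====

-- B replaces A's four orientation-specific range() branches with one directional cursor
-- walk from the lexicographically smaller endpoint; alternative decomposition, same cost.

-- ===== PORT A =====
def find_straight_positions_between (piece1 : Int × Int) (piece2 : Int × Int) : List (Int × Int) :=
  if piece1.2 - piece2.2 = 0 then
    if piece1.1 + 1 < piece2.1 then
      (PySem.List.pyRange (piece1.1 + 1) piece2.1 1).foldl
        (fun acc row_index => acc ++ [(row_index, piece1.2)]) []
    else
      (PySem.List.pyRange (piece2.1 + 1) piece1.1 1).foldl
        (fun acc row_index => acc ++ [(row_index, piece1.2)]) []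
  else if piece1.1 - piece2.1 = 0 then
    if piece1.2 + 1 < piece2.2 then
      (PySem.List.pyRange (piece1.2 + 1) piece2.2 1).foldl
        (fun acc column_index => acc ++ [(piece1.1, column_index)]) []
    else
      (PySem.List.pyRange (piece2.2 + 1) piece1.2 1).foldl
        (fun acc column_index => acc ++ [(piece1.1, column_index)]) []
  else []

-- ===== PORT B =====
-- the while loop of Source B, as fuel recursion (fuel only makes the walk total;
-- B always supplies enough fuel to reach `hi`)
def pvWalkB (dr dc : Int) (hi : Int × Int) : Nat → (Int × Int) → List (Int × Int)
  | 0, _ => []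
  | fuel + 1, cur =>
    if cur = hi then []
    else cur :: pvWalkB dr dc hi fuel (cur.1 + dr, cur.2 + dc)

def find_straight_positions_between_alt (piece1 : Int × Int) (piece2 : Int × Int) : List (Int × Int) :=
  let r1 := piece1.1; let c1 := piece1.2; let r2 := piece2.1; let c2 := piece2.2
  if (r1 ≠ r2 ∧ c1 ≠ c2) ∨ (r1 = r2 ∧ c1 = c2) then []
  else
    let lo := if r1 < r2 ∨ (r1 = r2 ∧ c1 < c2) then piece1 else piece2
    let hi := if r1 < r2 ∨ (r1 = r2 ∧ c1 < c2) then piece2 else piece1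
    let dr := (if hi.1 > lo.1 then (1 : Int) else 0) - (if hi.1 < lo.1 then 1 else 0)
    let dc := (if hi.2 > lo.2 then (1 : Int) else 0) - (if hi.2 < lo.2 then 1 else 0)
    pvWalkB dr dc hi ((hi.1 - lo.1).toNat + (hi.2 - lo.2).toNat) (lo.1 + dr, lo.2 + dc)

-- ===== PRECONDITION & SPEC =====
def Spec_find_straight_positions_between (piece1 : Int × Int) (piece2 : Int × Int) (out : List (Int × Int)) : Prop := out = find_straight_positions_between_alt piece1 piece2
instance (piece1 : Int × Int) (piece2 : Int × Int) (out : List (Int × Int)) : Decidable (Spec_find_straight_positions_between piece1 piece2 out) := by unfold Spec_find_straight_positions_between; infer_instance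

-- ===== CLAIM (what is proved, stated in full; the proofs are below) =====
def Claim_equal_find_straight_positions_between : Prop := ∀ (piece1 : Int × Int) (piece2 : Int × Int), Dom_find_straight_positions_between piece1 piece2 → Spec_find_straight_positions_between piece1 piece2 (find_straight_positions_between piece1 piece2)

-- ===== LEMMAS AND PROOFS =====

theorem pvWalkB_zero (dr dc : Int) (hi cur : Int × Int) : pvWalkB dr dc hi 0 cur = [] := rfl

theorem pvWalkB_succ (dr dc : Int) (hi cur : Int × Int) (f : Nat) :
    pvWalkB dr dc hi (f + 1) cur =
      if cur = hi then [] else cur :: pvWalkB dr dc hi f (cur.1 + dr, cur.2 + dc) := rfl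

-- A's append-loop over a range is a map over the range
theorem foldl_append_map {α β : Type} (g : α → β) (l : List α) (acc : List β) :
    l.foldl (fun acc x => acc ++ [g x]) acc = acc ++ l.map g := by
  induction l generalizing acc with
  | nil => simp
  | cons x xs ih => simp [List.foldl, ih]

-- the horizontal walk (dr = 1, dc = 0) enumerates an ascending integer interval
theorem walk_row (c : Int) (n : Nat) :
    ∀ (a : Int) (f : Nat), n ≤ f →
      pvWalkB 1 0 (a + (n : Int), c) f (a, c)
        = (PySem.List.pyRange a (a + (n : Int)) 1).map (fun x => (x, c)) := by
  induction n with
  | zero =>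
    intro a f _
    rw [PySem.List.pyRange_one_eq_nil (by omega)]
    cases f with
    | zero => rw [pvWalkB_zero]; rfl
    | succ f => rw [pvWalkB_succ, if_pos (by simp)]; rfl
  | succ n ih =>
    intro a f hf
    cases f with
    | zero => omega
    | succ f =>
      have hne : ((a, c) : Int × Int) ≠ (a + ((n + 1 : Nat) : Int), c) := by
        intro h
        have h1 : a = a + ((n + 1 : Nat) : Int) := congrArg Prod.fst h
        push_cast at h1; omega
      rw [pvWalkB_succ, if_neg hne]
      have harg : (a + ((n + 1 : Nat) : Int)) = (a + 1) + (n : Int) := by push_cast; ring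
      rw [harg]
      have step : ((a, c).1 + 1, (a, c).2 + 0) = ((a + 1 : Int), c) := by simp
      rw [step, ih (a + 1) f (by omega)]
      rw [PySem.List.pyRange_one_cons (a := a) (b := a + 1 + (n : Int)) (by omega)]
      simp

-- the vertical walk (dr = 0, dc = 1) enumerates an ascending integer interval
theorem walk_col (r : Int) (n : Nat) :
    ∀ (a : Int) (f : Nat), n ≤ f →
      pvWalkB 0 1 (r, a + (n : Int)) f (r, a)
        = (PySem.List.pyRange a (a + (n : Int)) 1).map (fun x => (r, x)) := by
  induction n with
  | zero =>
    intro a f _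
    rw [PySem.List.pyRange_one_eq_nil (by omega)]
    cases f with
    | zero => rw [pvWalkB_zero]; rfl
    | succ f => rw [pvWalkB_succ, if_pos (by simp)]; rfl
  | succ n ih =>
    intro a f hf
    cases f with
    | zero => omega
    | succ f =>
      have hne : ((r, a) : Int × Int) ≠ (r, a + ((n + 1 : Nat) : Int)) := by
        intro h
        have h1 : a = a + ((n + 1 : Nat) : Int) := congrArg Prod.snd h
        push_cast at h1; omega
      rw [pvWalkB_succ, if_neg hne]
      have harg : (a + ((n + 1 : Nat) : Int)) = (a + 1) + (n : Int) := by push_cast; ring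
      rw [harg]
      have step : ((r, a).1 + 0, (r, a).2 + 1) = (r, (a + 1 : Int)) := by simp
      rw [step, ih (a + 1) f (by omega)]
      rw [PySem.List.pyRange_one_cons (a := a) (b := a + 1 + (n : Int)) (by omega)]
      simp

-- walk lemmas in endpoint form
theorem walk_row' (c a b : Int) (f : Nat) (hab : a ≤ b) (hf : (b - a).toNat ≤ f) :
    pvWalkB 1 0 (b, c) f (a, c) = (PySem.List.pyRange a b 1).map (fun x => (x, c)) := by
  have h := walk_row c ((b - a).toNat) a f hf
  rw [show (a + (((b - a).toNat : Nat) : Int)) = b by omega] at h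
  exact h

theorem walk_col' (r a b : Int) (f : Nat) (hab : a ≤ b) (hf : (b - a).toNat ≤ f) :
    pvWalkB 0 1 (r, b) f (r, a) = (PySem.List.pyRange a b 1).map (fun x => (r, x)) := by
  have h := walk_col r ((b - a).toNat) a f hf
  rw [show (a + (((b - a).toNat : Nat) : Int)) = b by omega] at h
  exact h

-- evaluation of B's port in each geometric situation
theorem alt_empty (r1 c1 r2 c2 : Int) (h : (r1 ≠ r2 ∧ c1 ≠ c2) ∨ (r1 = r2 ∧ c1 = c2)) :
    find_straight_positions_between_alt (r1, c1) (r2, c2) = [] := by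
  simp only [find_straight_positions_between_alt]
  rw [if_pos h]

theorem alt_col_up (c r1 r2 : Int) (h : r1 < r2) :
    find_straight_positions_between_alt (r1, c) (r2, c)
      = pvWalkB 1 0 (r2, c) ((r2 - r1).toNat) (r1 + 1, c) := by
  have h1 : r1 ≠ r2 := by omega
  have h2 : ¬ r2 < r1 := by omega
  simp [find_straight_positions_between_alt, h, h1, h2]

theorem alt_col_down (c r1 r2 : Int) (h : r2 < r1) :
    find_straight_positions_between_alt (r1, c) (r2, c)
      = pvWalkB 1 0 (r1, c) ((r1 - r2).toNat) (r2 + 1, c) := by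
  have h1 : r1 ≠ r2 := by omega
  have h2 : ¬ r1 < r2 := by omega
  simp [find_straight_positions_between_alt, h, h1, h2]

theorem alt_row_right (r c1 c2 : Int) (h : c1 < c2) :
    find_straight_positions_between_alt (r, c1) (r, c2)
      = pvWalkB 0 1 (r, c2) ((c2 - c1).toNat) (r, c1 + 1) := by
  have h1 : c1 ≠ c2 := by omega
  have h2 : ¬ c2 < c1 := by omega
  simp [find_straight_positions_between_alt, h, h1, h2]

theorem alt_row_left (r c1 c2 : Int) (h : c2 < c1) :
    find_straight_positions_between_alt (r, c1) (r, c2)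
      = pvWalkB 0 1 (r, c1) ((c1 - c2).toNat) (r, c2 + 1) := by
  have h1 : c1 ≠ c2 := by omega
  have h2 : ¬ c1 < c2 := by omega
  simp [find_straight_positions_between_alt, h, h1, h2]

-- ===== VERDICT (by name: the statement is the Claim_ definition above) =====
theorem find_straight_positions_between_spec : Claim_equal_find_straight_positions_between := by
  intro p1 p2 _
  unfold Spec_find_straight_positions_between
  obtain ⟨r1, c1⟩ := p1
  obtain ⟨r2, c2⟩ := p2
  by_cases hc : c1 = c2
  · subst hc
    by_cases hr : r1 = r2
    · -- identical squares
      subst hr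
      rw [alt_empty _ _ _ _ (Or.inr ⟨rfl, rfl⟩)]
      simp only [find_straight_positions_between]
      rw [if_pos (by omega), if_neg (by omega), PySem.List.pyRange_one_eq_nil (by omega)]
      rfl
    · by_cases hlt : r1 < r2
      · rw [alt_col_up _ _ _ hlt,
            walk_row' c1 (r1 + 1) r2 _ (by omega) (by omega)]
        simp only [find_straight_positions_between]
        rw [if_pos (by omega)]
        by_cases h2 : r1 + 1 < r2
        · rw [if_pos h2, foldl_append_map]; rfl
        · rw [if_neg h2, PySem.List.pyRange_one_eq_nil (a := r2 + 1) (by omega),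
              PySem.List.pyRange_one_eq_nil (a := r1 + 1) (by omega)]
          rfl
      · have hgt : r2 < r1 := by omega
        rw [alt_col_down _ _ _ hgt,
            walk_row' c1 (r2 + 1) r1 _ (by omega) (by omega)]
        simp only [find_straight_positions_between]
        rw [if_pos (by omega), if_neg (by omega), foldl_append_map]
        rfl
  · by_cases hr : r1 = r2
    · subst hr
      by_cases hlt : c1 < c2
      · rw [alt_row_right _ _ _ hlt,
            walk_col' r1 (c1 + 1) c2 _ (by omega) (by omega)]
        simp only [find_straight_positions_between]
        rw [if_neg (by omega), if_pos (by omega)]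
        by_cases h2 : c1 + 1 < c2
        · rw [if_pos h2, foldl_append_map]; rfl
        · rw [if_neg h2, PySem.List.pyRange_one_eq_nil (a := c2 + 1) (by omega),
              PySem.List.pyRange_one_eq_nil (a := c1 + 1) (by omega)]
          rfl
      · have hgt : c2 < c1 := by omega
        rw [alt_row_left _ _ _ hgt,
            walk_col' r1 (c2 + 1) c1 _ (by omega) (by omega)]
        simp only [find_straight_positions_between]
        rw [if_neg (by omega), if_pos (by omega), if_neg (by omega), foldl_append_map]
        rfl
    · -- not aligned
      rw [alt_empty _ _ _ _ (Or.inl ⟨hr, hc⟩)]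
      simp only [find_straight_positions_between]
      rw [if_neg (by omega), if_neg (by omega)]
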